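-- pv_equiv track=rewrite | github.com/randall-frank/totally | utilities/gen_seu_entity.py | decode1
-- ===== SOURCE A (Python) =====
-- def decode1(d):
--     s = ""
--     i = 1
--     for b in range(7):
--         if d & i:
--             s += "@"
--         else:
--             s += "-"
--         i = i * 2
--     return s
-- ===== SOURCE B (Python) =====
-- def decode1(d):
--     bits = format(d & 0x7F, "07b")[::-1]
--     return bits.replace("1", "@").replace("0", "-")
-- ===== Notes on version B (the rewrite author's own statement) =====
-- stated objective: idiomatic
-- what changed: Replaces the explicit per-bit loop and string accumulation by a single base-two conversion of the masked low seven bits via format(..., '07b'), reversed to least-significant-first order and translated to '@'/'-' with str.replace.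
import Mathlib
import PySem

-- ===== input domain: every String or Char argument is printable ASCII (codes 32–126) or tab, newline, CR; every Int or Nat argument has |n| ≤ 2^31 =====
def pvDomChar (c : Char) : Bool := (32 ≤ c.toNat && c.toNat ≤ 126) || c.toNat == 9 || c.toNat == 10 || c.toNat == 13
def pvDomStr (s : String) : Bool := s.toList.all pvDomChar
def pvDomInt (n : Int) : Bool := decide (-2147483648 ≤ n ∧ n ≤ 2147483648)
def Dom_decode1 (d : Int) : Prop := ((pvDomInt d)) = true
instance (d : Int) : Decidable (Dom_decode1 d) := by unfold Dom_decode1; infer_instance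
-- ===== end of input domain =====

-- B replaces A's per-bit loop by one base-2 conversion of d & 0x7f, reversed and translated (idiomatic).

-- ===== PORT A =====
-- loop 'for b in range(7)': fold carrying (s, i); 'if d & i' tests truthiness (nonzero)
def decode1 (d : Int) : String :=
  ((PySem.List.pyRange 0 7 1).foldl
    (fun (si : String × Int) _b =>
      (si.1 ++ (if PySem.Int.band d si.2 ≠ 0 then "@" else "-"), si.2 * 2))
    ("", 1)).1

-- ===== PORT B =====
-- format(m, '07b'): the 7-char MSB-first binary representation of m (0 ≤ m < 128);
-- exact for that range, ported via Nat.testBit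
def fmt07b (m : Nat) : List Char :=
  (List.range 7).reverse.map (fun k => if m.testBit k then '1' else '0')

def decode1_alt (d : Int) : String :=
  let m : Nat := (PySem.Int.band d 127).toNat   -- d & 0x7F (always in [0,128))
  let bits : List Char := (fmt07b m).reverse     -- format(...)[::-1]
  String.ofList (bits.map (fun c => if c = '1' then '@' else '-'))  -- .replace twice

-- ===== PRECONDITION & SPEC =====
def Spec_decode1 (d : Int) (out : String) : Prop := out = decode1_alt d
instance (d : Int) (out : String) : Decidable (Spec_decode1 d out) := by unfold Spec_decode1; infer_instance

-- ===== CLAIM (what is proved, stated in full; the proofs are below) =====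
def Claim_equal_decode1 : Prop := ∀ (d : Int), Dom_decode1 d → Spec_decode1 d (decode1 d)

-- ===== LEMMAS AND PROOFS =====

-- 127 - x complements the low 7 bits
set_option maxRecDepth 16384 in
theorem sub_and_small : ∀ x < 128, ∀ c < 128, (127 - x) &&& c = c - (c &&& x) := by decide

theorem and_small_mod (n c : Nat) (hc : c < 128) : n &&& c = (n % 128) &&& c := by
  have h127 : c &&& 127 = c := by
    have := Nat.and_two_pow_sub_one_eq_mod c 7
    norm_num at this; omega
  have hn : n &&& 127 = n % 128 := by
    have := Nat.and_two_pow_sub_one_eq_mod n 7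
    norm_num at this; omega
  calc n &&& c = n &&& (127 &&& c) := by rw [Nat.and_comm 127 c, h127]
    _ = (n &&& 127) &&& c := by rw [Nat.and_assoc]
    _ = (n % 128) &&& c := by rw [hn]

-- band with a small nonnegative mask only sees the low 7 bits
theorem bandc (d c : Int) (h0 : 0 ≤ c) (h1 : c < 128) :
    PySem.Int.band d c = PySem.Int.band (d % 128) c := by
  have e1 : 0 ≤ d % 128 := by omega
  unfold PySem.Int.band
  by_cases hd : 0 ≤ d
  · simp only [hd, e1, h0, if_true]
    have ht : (d % 128).toNat = d.toNat % 128 := by omega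
    rw [ht, ← and_small_mod d.toNat c.toNat (by omega)]
  · simp only [hd, e1, h0, if_true, if_false]
    have hm : (d % 128).toNat = 127 - (-d - 1).toNat % 128 := by omega
    rw [hm]
    have h1' : (-d - 1).toNat % 128 < 128 := Nat.mod_lt _ (by norm_num)
    have q1 : (127 - (-d - 1).toNat % 128) &&& c.toNat
        = c.toNat - (c.toNat &&& ((-d - 1).toNat % 128)) :=
      sub_and_small _ h1' _ (by omega)
    have q2 : c.toNat &&& ((-d - 1).toNat % 128) = c.toNat &&& (-d - 1).toNat := by
      rw [Nat.and_comm c.toNat ((-d - 1).toNat % 128),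
          ← and_small_mod (-d - 1).toNat c.toNat (by omega),
          Nat.and_comm]
    rw [q1, q2]

-- d & 127 = d mod 128 (Python semantics)
theorem band127 (d : Int) : PySem.Int.band d 127 = d % 128 := by
  have e1 : 0 ≤ d % 128 := by omega
  rw [bandc d 127 (by norm_num) (by norm_num)]
  unfold PySem.Int.band
  simp only [e1, if_true, show (0:Int) ≤ 127 by norm_num]
  have hn : (d % 128).toNat &&& (127 : Int).toNat = (d % 128).toNat % 128 := by
    have := Nat.and_two_pow_sub_one_eq_mod (d % 128).toNat 7
    norm_num at this
    simpa using this
  rw [hn]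
  omega

theorem decode1_mod (d : Int) : decode1 d = decode1 (d % 128) := by
  have hlist : PySem.List.pyRange 0 7 1 = [0, 1, 2, 3, 4, 5, 6] := by decide
  simp only [decode1, hlist, List.foldl_cons, List.foldl_nil]
  norm_num [bandc d 1 (by norm_num) (by norm_num), bandc d 2 (by norm_num) (by norm_num),
    bandc d 4 (by norm_num) (by norm_num), bandc d 8 (by norm_num) (by norm_num),
    bandc d 16 (by norm_num) (by norm_num), bandc d 32 (by norm_num) (by norm_num),
    bandc d 64 (by norm_num) (by norm_num)]

theorem decode1_alt_mod (d : Int) : decode1_alt d = decode1_alt (d % 128) := by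
  simp only [decode1_alt, band127]
  have h : d % 128 % 128 = d % 128 := by omega
  rw [h]

theorem small_eq : ∀ n < 128, decode1 (Int.ofNat n) = decode1_alt (Int.ofNat n) := by decide

-- ===== VERDICT (by name: the statement is the Claim_ definition above) =====
theorem decode1_spec : Claim_equal_decode1 := by
  intro d _
  unfold Spec_decode1
  rw [decode1_mod, decode1_alt_mod]
  have h := small_eq (d % 128).toNat (by omega)
  rwa [show (Int.ofNat (d % 128).toNat) = d % 128 by rw [Int.ofNat_eq_natCast]; omega] at h
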